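-- pv_equiv track=rewrite | github.com/evalkov/DeepRank-Ab | scripts/stageB_progress_live.py | _select_visible
-- ===== SOURCE A (Python) =====
-- from typing import List, Optional
--
-- def _select_visible(shards: List[dict], max_rows: int) -> tuple:
--     """Pick the most interesting shards to display, up to max_rows.
--
--     Display order: running/failed (oldest first), then done, then pending/waiting_A.
--     Returns (visible_list, hidden_list).
--     """
--     running = [s for s in shards if s["status"] in ("running", "failed")]
--     done = [s for s in shards if s["status"] == "done"]
--     pending = [s for s in shards if s["status"] in ("pending", "waiting_A")]
--
--     # Oldest running first (earliest started_at = longest elapsed)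
--     running.sort(key=lambda s: s.get("started_at") or "9")
--
--     ordered = running + done + pending
--
--     if max_rows <= 0 or len(ordered) <= max_rows:
--         return ordered, []
--
--     return ordered[:max_rows], ordered[max_rows:]
-- ===== SOURCE B (Python) =====
-- from typing import List, Optional
--
-- def _rank(s) -> Optional[int]:
--     st = s["status"]
--     if st in ("running", "failed"):
--         return 0
--     if st == "done":
--         return 1
--     if st in ("pending", "waiting_A"):
--         return 2
--     return None
--
-- def _select_visible(shards: List[dict], max_rows: int) -> tuple:
--     """One stable composite-key sort instead of three filter passes + partial sort."""
--     ordered = sorted(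
--         (s for s in shards if _rank(s) is not None),
--         key=lambda s: (_rank(s), (s.get("started_at") or "9") if _rank(s) == 0 else ""),
--     )
--     if max_rows <= 0 or len(ordered) <= max_rows:
--         return ordered, []
--     return ordered[:max_rows], ordered[max_rows:]
-- ===== Notes on version B (the rewrite author's own statement) =====
-- stated objective: alternative
-- what changed: Replaces A's three separate status-filter passes plus a partial sort of the running bucket by a single stable sort of the known-status shards under a composite (rank, started_at-or-'9') key, relying on sort stability to keep done/pending in original order.
import Mathlib
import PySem

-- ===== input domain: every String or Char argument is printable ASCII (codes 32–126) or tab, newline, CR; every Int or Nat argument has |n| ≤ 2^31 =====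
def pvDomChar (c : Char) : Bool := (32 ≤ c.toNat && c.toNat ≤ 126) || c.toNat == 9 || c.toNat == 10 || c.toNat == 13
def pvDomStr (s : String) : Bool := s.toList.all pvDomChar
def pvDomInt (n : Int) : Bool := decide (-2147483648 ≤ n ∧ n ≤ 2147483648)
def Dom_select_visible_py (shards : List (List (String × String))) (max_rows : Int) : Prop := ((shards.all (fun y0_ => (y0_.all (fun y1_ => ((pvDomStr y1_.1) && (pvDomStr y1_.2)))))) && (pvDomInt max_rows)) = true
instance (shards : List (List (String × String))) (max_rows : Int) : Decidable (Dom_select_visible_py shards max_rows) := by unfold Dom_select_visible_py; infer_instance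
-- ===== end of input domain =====

-- B replaces A's three status-filter passes plus a partial sort of the running bucket by ONE stable
-- composite-key sort over the known-status shards (objective: alternative decomposition, same cost).

-- ===== PORT A =====
-- s["status"] (raises KeyError when absent; Pre_ excludes that, so getD "" is exact on Pre_)
def pvStatusA (s : List (String × String)) : String :=
  PySem.Dict.getD (PySem.Dict.mk s) "status" ""

-- lambda s: s.get("started_at") or "9"   (missing key or "" are falsy → "9")
def pvKeyA (s : List (String × String)) : String :=
  let v := PySem.Dict.getD (PySem.Dict.mk s) "started_at" ""
  if v = "" then "9" else v

def select_visible_py (shards : List (List (String × String))) (max_rows : Int) : (List (List (String × String))) × (List (List (String × String))) :=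
  let running := shards.filter (fun s => pvStatusA s == "running" || pvStatusA s == "failed")
  let done := shards.filter (fun s => pvStatusA s == "done")
  let pending := shards.filter (fun s => pvStatusA s == "pending" || pvStatusA s == "waiting_A")
  let running := PySem.List.sorted running pvKeyA
  let ordered := running ++ done ++ pending
  if max_rows ≤ 0 ∨ (ordered.length : Int) ≤ max_rows then (ordered, ([] : List (List (String × String))))
  else (PySem.List.slice ordered none (some max_rows), PySem.List.slice ordered (some max_rows) none)

-- ===== PORT B =====
-- _rank(s): 0 running/failed, 1 done, 2 pending/waiting_A, None otherwise; s["status"] raises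
-- KeyError when absent (excluded by Pre_), so get? is exact there
def pvRankB? (s : List (String × String)) : Option Int :=
  if PySem.Dict.get? (PySem.Dict.mk s) "status" = some "running" ∨ PySem.Dict.get? (PySem.Dict.mk s) "status" = some "failed" then some 0
  else if PySem.Dict.get? (PySem.Dict.mk s) "status" = some "done" then some 1
  else if PySem.Dict.get? (PySem.Dict.mk s) "status" = some "pending" ∨ PySem.Dict.get? (PySem.Dict.mk s) "status" = some "waiting_A" then some 2
  else none

-- (s.get("started_at") or "9") if _rank(s) == 0 else ""
def pvSecB (s : List (String × String)) : String :=
  if pvRankB? s = some 0 then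
    (let v := PySem.Dict.getD (PySem.Dict.mk s) "started_at" ""
     if v = "" then "9" else v)
  else ""

def select_visible_py_alt (shards : List (List (String × String))) (max_rows : Int) : (List (List (String × String))) × (List (List (String × String))) :=
  let ordered := PySem.List.sorted2 (shards.filter (fun s => (pvRankB? s).isSome))
                   (fun s => (pvRankB? s).getD 0) pvSecB
  if max_rows ≤ 0 ∨ (ordered.length : Int) ≤ max_rows then (ordered, ([] : List (List (String × String))))
  else (PySem.List.slice ordered none (some max_rows), PySem.List.slice ordered (some max_rows) none)

-- ===== PRECONDITION & SPEC =====
-- Pre_: every shard carries a "status" key — on a shard without it Python A raises KeyError (s["status"]).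
def Pre_select_visible_py (shards : List (List (String × String))) (max_rows : Int) : Prop :=
  (shards.all (fun s => PySem.Dict.contains (PySem.Dict.mk s) "status")) = true
instance (shards : List (List (String × String))) (max_rows : Int) : Decidable (Pre_select_visible_py shards max_rows) := by unfold Pre_select_visible_py; infer_instance

def pvWitness_select_visible_py : (List (List (String × String))) × Int :=
  ([[("status", "done")], [("status", "running"), ("started_at", "2")]], 1)

def Spec_select_visible_py (shards : List (List (String × String))) (max_rows : Int) (out : (List (List (String × String))) × (List (List (String × String)))) : Prop := out = select_visible_py_alt shards max_rows
instance (shards : List (List (String × String))) (max_rows : Int) (out : (List (List (String × String))) × (List (List (String × String)))) : Decidable (Spec_select_visible_py shards max_rows out) := by unfold Spec_select_visible_py; infer_instance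

-- ===== CLAIM (what is proved, stated in full; the proofs are below) =====
def Claim_equal_select_visible_py : Prop := ∀ (shards : List (List (String × String))) (max_rows : Int), Dom_select_visible_py shards max_rows → Pre_select_visible_py shards max_rows → Spec_select_visible_py shards max_rows (select_visible_py shards max_rows)

-- ===== LEMMAS AND PROOFS =====

theorem pvRank_cases (s : List (String × String)) :
    pvRankB? s = none ∨ pvRankB? s = some 0 ∨ pvRankB? s = some 1 ∨ pvRankB? s = some 2 := by
  unfold pvRankB?; split_ifs <;> simp

theorem insertBy_append_right {α : Type} (before : α → α → Bool) (x : α) (r t : List α)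
    (h : ∀ y ∈ t, before x y = true) :
    PySem.List.insertBy before x (r ++ t) = PySem.List.insertBy before x r ++ t := by
  induction r with
  | nil =>
    cases t with
    | nil => rfl
    | cons a t' => simp [PySem.List.insertBy, h a (by simp)]
  | cons a r' ih =>
    by_cases hb : before x a = true <;> simp [PySem.List.insertBy, hb, ih]

theorem insertBy_append_left {α : Type} (before : α → α → Bool) (x : α) (r t : List α)
    (h : ∀ y ∈ r, before x y = false) :
    PySem.List.insertBy before x (r ++ t) = r ++ PySem.List.insertBy before x t := by
  induction r with
  | nil => rfl
  | cons a r' ih =>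
    have ha := h a (by simp)
    simp only [List.cons_append, PySem.List.insertBy, ha]
    simp only [Bool.false_eq_true, if_false]
    rw [ih (fun y hy => h y (by simp [hy]))]

theorem insertBy_congr {α : Type} (b₁ b₂ : α → α → Bool) (x : α) (ys : List α)
    (h : ∀ y ∈ ys, b₁ x y = b₂ x y) :
    PySem.List.insertBy b₁ x ys = PySem.List.insertBy b₂ x ys := by
  induction ys with
  | nil => rfl
  | cons a ys' ih =>
    have ha := h a (by simp)
    simp only [PySem.List.insertBy, ha]
    by_cases hb : b₂ x a = true
    · simp [hb]
    · simp [hb, ih (fun y hy => h y (by simp [hy]))]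

-- the composite-key comparison of B's sort
def pvB2 (a b : List (String × String)) : Bool :=
  decide ((pvRankB? a).getD 0 < (pvRankB? b).getD 0) ||
    (!decide ((pvRankB? b).getD 0 < (pvRankB? a).getD 0) && decide (pvSecB a < pvSecB b))

-- A's running-sort comparison
def pvBA (a b : List (String × String)) : Bool := decide (pvKeyA a < pvKeyA b)

theorem pvSecB_eq_keyA (s : List (String × String)) (h : pvRankB? s = some 0) :
    pvSecB s = pvKeyA s := by
  simp [pvSecB, pvKeyA, h]

-- the main invariant: B's insertion fold over the filtered list equals A's three buckets
theorem pvMain (l : List (List (String × String))) :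
    ∀ (R D P : List (List (String × String))),
      (∀ y ∈ R, pvRankB? y = some 0) → (∀ y ∈ D, pvRankB? y = some 1) →
      (∀ y ∈ P, pvRankB? y = some 2) →
      (l.filter (fun s => (pvRankB? s).isSome)).foldl
          (fun acc x => PySem.List.insertBy pvB2 x acc) (R ++ D ++ P)
        = (l.filter (fun s => pvRankB? s = some 0)).foldl
            (fun acc x => PySem.List.insertBy pvBA x acc) R
          ++ (D ++ l.filter (fun s => pvRankB? s = some 1))
          ++ (P ++ l.filter (fun s => pvRankB? s = some 2)) := by
  induction l with
  | nil => intro R D P _ _ _; simp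
  | cons s l ih =>
    intro R D P hR hD hP
    rcases pvRank_cases s with h | h | h | h
    · -- unknown status: skipped everywhere
      simp only [List.filter_cons, h]
      simpa using ih R D P hR hD hP
    · -- running/failed
      have h1 : ∀ y ∈ D ++ P, pvB2 s y = true := by
        intro y hy
        rcases List.mem_append.mp hy with hy | hy
        · have := hD y hy; simp [pvB2, h, this]
        · have := hP y hy; simp [pvB2, h, this]
      have h2 : ∀ y ∈ R, pvB2 s y = pvBA s y := by
        intro y hy
        have hy0 := hR y hy
        simp [pvB2, pvBA, h, hy0, pvSecB_eq_keyA s h, pvSecB_eq_keyA y hy0]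
      have step : PySem.List.insertBy pvB2 s (R ++ (D ++ P)) =
          PySem.List.insertBy pvBA s R ++ (D ++ P) := by
        rw [insertBy_append_right pvB2 s R (D ++ P) h1,
            insertBy_congr pvB2 pvBA s R h2]
      have hR' : ∀ y ∈ PySem.List.insertBy pvBA s R, pvRankB? y = some 0 := by
        intro y hy
        rcases (PySem.List.mem_insertBy pvBA s y R).mp hy with rfl | hy
        · exact h
        · exact hR y hy
      simp only [List.filter_cons, h]
      norm_num
      rw [step]
      simpa using ih _ D P hR' hD hP
    · -- done
      have h1 : ∀ y ∈ R, pvB2 s y = false := by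
        intro y hy; have := hR y hy; simp [pvB2, h, this]
      have h2 : ∀ y ∈ P, pvB2 s y = true := by
        intro y hy; have := hP y hy; simp [pvB2, h, this]
      have h3 : ∀ y ∈ D, pvB2 s y = false := by
        intro y hy; have := hD y hy; simp [pvB2, h, this, pvSecB]
      have step : PySem.List.insertBy pvB2 s (R ++ (D ++ P)) = R ++ ((D ++ [s]) ++ P) := by
        rw [insertBy_append_left pvB2 s R (D ++ P) h1,
            insertBy_append_right pvB2 s D P h2,
            PySem.List.insertBy_of_forall_not_before pvB2 s D h3]
      have hD' : ∀ y ∈ D ++ [s], pvRankB? y = some 1 := by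
        intro y hy
        rcases List.mem_append.mp hy with hy | hy
        · exact hD y hy
        · simp at hy; subst hy; exact h
      simp only [List.filter_cons, h]
      norm_num
      rw [step]
      simpa using ih R (D ++ [s]) P hR hD' hP
    · -- pending/waiting_A
      have h1 : ∀ y ∈ R ++ D ++ P, pvB2 s y = false := by
        intro y hy
        simp only [List.append_assoc, List.mem_append] at hy
        rcases hy with hy | hy | hy
        · have := hR y hy; simp [pvB2, h, this]
        · have := hD y hy; simp [pvB2, h, this]
        · have := hP y hy; simp [pvB2, h, this, pvSecB]
      have step : PySem.List.insertBy pvB2 s (R ++ (D ++ P)) = R ++ (D ++ (P ++ [s])) := by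
        have h1' : ∀ y ∈ R ++ (D ++ P), pvB2 s y = false := by
          simpa using h1
        rw [PySem.List.insertBy_of_forall_not_before pvB2 s _ h1']
        simp
      have hP' : ∀ y ∈ P ++ [s], pvRankB? y = some 2 := by
        intro y hy
        rcases List.mem_append.mp hy with hy | hy
        · exact hP y hy
        · simp at hy; subst hy; exact h
      simp only [List.filter_cons, h]
      norm_num
      rw [step]
      simpa using ih R D (P ++ [s]) hR hD hP' 

-- A's filter predicates coincide with B's rank tests (pointwise, no precondition needed)
theorem pvFilterRun (s : List (String × String)) :
    (pvStatusA s == "running" || pvStatusA s == "failed") = decide (pvRankB? s = some 0) := by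
  unfold pvStatusA pvRankB?
  rcases h : PySem.Dict.get? (PySem.Dict.mk s) "status" with _ | v
  · simp [PySem.Dict.getD, h]
  · simp only [PySem.Dict.getD, h, Option.getD_some]
    split_ifs <;> simp_all

theorem pvFilterDone (s : List (String × String)) :
    (pvStatusA s == "done") = decide (pvRankB? s = some 1) := by
  unfold pvStatusA pvRankB?
  rcases h : PySem.Dict.get? (PySem.Dict.mk s) "status" with _ | v
  · simp [PySem.Dict.getD, h]
  · simp only [PySem.Dict.getD, h, Option.getD_some]
    split_ifs <;> simp_all <;> rcases ‹_ ∨ _› with rfl | rfl <;> simp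

theorem pvFilterPend (s : List (String × String)) :
    (pvStatusA s == "pending" || pvStatusA s == "waiting_A") = decide (pvRankB? s = some 2) := by
  unfold pvStatusA pvRankB?
  rcases h : PySem.Dict.get? (PySem.Dict.mk s) "status" with _ | v
  · simp [PySem.Dict.getD, h]
  · simp only [PySem.Dict.getD, h, Option.getD_some]
    split_ifs <;> simp_all <;> rcases ‹_ ∨ _› with rfl | rfl <;> simp

theorem pvOrdered_eq (shards : List (List (String × String))) :
    PySem.List.sorted (shards.filter (fun s => pvStatusA s == "running" || pvStatusA s == "failed")) pvKeyA
      ++ shards.filter (fun s => pvStatusA s == "done")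
      ++ shards.filter (fun s => pvStatusA s == "pending" || pvStatusA s == "waiting_A")
    = PySem.List.sorted2 (shards.filter (fun s => (pvRankB? s).isSome))
        (fun s => (pvRankB? s).getD 0) pvSecB := by
  have hrun : shards.filter (fun s => pvStatusA s == "running" || pvStatusA s == "failed")
      = shards.filter (fun s => pvRankB? s = some 0) := List.filter_congr (fun s _ => pvFilterRun s)
  have hdone : shards.filter (fun s => pvStatusA s == "done")
      = shards.filter (fun s => pvRankB? s = some 1) := List.filter_congr (fun s _ => pvFilterDone s)
  have hpend : shards.filter (fun s => pvStatusA s == "pending" || pvStatusA s == "waiting_A")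
      = shards.filter (fun s => pvRankB? s = some 2) := List.filter_congr (fun s _ => pvFilterPend s)
  rw [hrun, hdone, hpend]
  have h := pvMain shards [] [] [] (by simp) (by simp) (by simp)
  simp only [List.append_nil, List.nil_append] at h
  exact h.symm

-- ===== VERDICT (by name: the statement is the Claim_ definition above) =====
theorem select_visible_py_spec : Claim_equal_select_visible_py := by
  intro shards max_rows _ _
  unfold Spec_select_visible_py select_visible_py select_visible_py_alt
  dsimp only
  rw [pvOrdered_eq]
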